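-- pv_equiv track=rewrite | github.com/GustavoDePieri/ontop-feedback-dashboard | local_sentiment_db.py | parse_speakers
-- ===== SOURCE A (Python) =====
-- from typing import List, Dict, Any
--
-- def parse_speakers(text: str) -> Dict[str, str]:
--     """Parse transcript text to extract individual speakers and their dialogue"""
--     speakers = {}
--
--     if not text or not isinstance(text, str):
--         return speakers
--
--     # Split by newlines and process each line
--     lines = text.split('\n')
--
--     current_speaker = None
--     current_text = []
--
--     for line in lines:
--         line = line.strip()
--         if not line:
--             continue
--
--         # Check if line starts with a speaker pattern (Name: dialogue)
--         if ':' in line and len(line.split(':')[0].strip()) > 0: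
--             # If we had a previous speaker, save their text
--             if current_speaker and current_text:
--                 speakers[current_speaker] = ' '.join(current_text)
--
--             # Extract new speaker
--             parts = line.split(':', 1)
--             speaker_name = parts[0].strip()
--
--             # Clean up speaker name (remove numbers, extra spaces)
--             speaker_name = ' '.join(word for word in speaker_name.split() if not word.isdigit())
--
--             current_speaker = speaker_name
--             current_text = [parts[1].strip()] if len(parts) > 1 else []
--         else:
--             # Continuation of current speaker's dialogue
--             if current_speaker:
--                 current_text.append(line)
--
--     # Save the last speaker
--     if current_speaker and current_text:
--         speakers[current_speaker] = ' '.join(current_text)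
--
--     return speakers
-- ===== SOURCE B (Python) =====
-- def parse_speakers(text):
--     """Parse transcript text to extract individual speakers and their dialogue."""
--     if not text or not isinstance(text, str):
--         return {}
--
--     lines = [s for s in (l.strip() for l in text.split('\n')) if s]
--
--     def is_header(l):
--         return ':' in l and l.split(':')[0].strip() != ''
--
--     # Random-access plan: all header positions; each speaker's block of dialogue
--     # runs from just after its header line up to the next header (or end of input).
--     idx = [i for i, l in enumerate(lines) if is_header(l)]
--
--     result = {}
--     for i, end in zip(idx, idx[1:] + [len(lines)]):
--         head, tail = lines[i].split(':', 1)
--         name = ' '.join(w for w in head.strip().split() if not w.isdigit())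
--         if name:
--             result[name] = ' '.join([tail.strip()] + lines[i + 1:end])
--     return result
-- ===== Notes on version B (the rewrite author's own statement) =====
-- stated objective: alternative
-- what changed: Replaces A's streaming state machine (current_speaker/current_text mutated line by line with save-on-next-header and a final flush) by a random-access plan: compute the list of header-line positions once, then build each speaker's entry independently by slicing the dialogue lines between consecutive header positions.
import Mathlib
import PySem

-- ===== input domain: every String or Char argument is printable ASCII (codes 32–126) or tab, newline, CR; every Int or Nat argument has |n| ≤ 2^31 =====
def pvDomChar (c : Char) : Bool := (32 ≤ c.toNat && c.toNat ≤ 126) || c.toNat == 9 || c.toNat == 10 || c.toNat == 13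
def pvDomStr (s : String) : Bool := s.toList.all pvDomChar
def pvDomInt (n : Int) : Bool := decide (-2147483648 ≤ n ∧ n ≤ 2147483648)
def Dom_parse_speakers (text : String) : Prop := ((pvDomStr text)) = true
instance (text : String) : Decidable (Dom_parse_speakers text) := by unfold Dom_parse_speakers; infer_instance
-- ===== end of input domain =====

-- B re-implements the parser by random access: it collects all header-line positions first and
-- builds each speaker's entry from the slice of lines between consecutive headers, instead of
-- A's streaming current-speaker state machine; objective: alternative.

-- shared helper: the speaker-name cleanup ' '.join(w for w in s.strip().split() if not w.isdigit()),
-- written inline in both Pythons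
def psName (s : String) : String :=
  PySem.Str.join " "
    ((PySem.Str.split₀ (PySem.Str.strip s)).filter (fun w => !PySem.Str.strIsdigit w))

-- ===== PORT A =====

-- one iteration of A's `for line in lines` loop; state = (speakers, current_speaker, current_text);
-- Python's `current_speaker` (None or str) is an Option String; its truthiness test
-- `if current_speaker` is `cs.getD "" ≠ ""` (None and "" are exactly the falsy values).
def psStepA (st : PySem.Dict String String × Option String × List String) (rawline : String) :
    PySem.Dict String String × Option String × List String :=
  let line := PySem.Str.strip rawline
  if line = "" then st
  else
    let (speakers, cs, ct) := st
    if PySem.Str.isIn ":" line = true ∧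
        0 < PySem.Str.len (PySem.Str.strip (PySem.List.pyGetD ((PySem.Str.split? line ":").getD []) 0 "")) then
      -- save previous speaker, then open the new one
      let speakers := if cs.getD "" ≠ "" ∧ ct ≠ [] then
          speakers.insert (cs.getD "") (PySem.Str.join " " ct) else speakers
      let parts := (PySem.Str.splitMax? line ":" 1).getD []   -- ":" ≠ "", so splitMax? is some
      let name := psName (PySem.List.pyGetD parts 0 "")
      (speakers, some name,
        if 1 < parts.length then [PySem.Str.strip (PySem.List.pyGetD parts 1 "")] else [])
    else
      if cs.getD "" ≠ "" then (speakers, cs, ct ++ [line]) else (speakers, cs, ct)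

def parse_speakers (text : String) : List (String × String) :=
  if text = "" then []
  else
    let lines := (PySem.Str.split? text "\n").getD []        -- "\n" ≠ "", so split? is some
    let st := lines.foldl psStepA (PySem.Dict.empty, none, [])
    (if st.2.1.getD "" ≠ "" ∧ st.2.2 ≠ [] then
        st.1.insert (st.2.1.getD "") (PySem.Str.join " " st.2.2) else st.1).items

-- ===== PORT B =====

-- Source B's is_header: ':' in l and l.split(':')[0].strip() != ''
def psIsHeader (l : String) : Bool :=
  PySem.Str.isIn ":" l &&
    !(PySem.Str.strip (PySem.List.pyGetD ((PySem.Str.split? l ":").getD []) 0 "") == "")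

-- body of Source B's `for i, end in zip(...)` loop: one speaker's entry from lines[i] and the
-- dialogue slice lines[i+1:end]
def psAltStep (lines : List String) (d : PySem.Dict String String) (p : Int × Int) :
    PySem.Dict String String :=
  let parts := (PySem.Str.splitMax? (PySem.List.pyGetD lines p.1 "") ":" 1).getD []
  let name := psName (PySem.List.pyGetD parts 0 "")
  if name ≠ "" then
    d.insert name (PySem.Str.join " "
      ([PySem.Str.strip (PySem.List.pyGetD parts 1 "")] ++
        PySem.List.slice lines (some (p.1 + 1)) (some p.2)))
  else d

def parse_speakers_alt (text : String) : List (String × String) :=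
  if text = "" then []
  else
    let lines := (((PySem.Str.split? text "\n").getD []).map PySem.Str.strip).filter (· ≠ "")
    let idx := ((PySem.List.enumerate lines).filter (fun p => psIsHeader p.2)).map Prod.fst
    let pairs := idx.zip (PySem.List.slice idx (some 1) none ++ [(lines.length : Int)])
    (pairs.foldl (psAltStep lines) PySem.Dict.empty).items

-- ===== PRECONDITION & SPEC =====
def Spec_parse_speakers (text : String) (out : List (String × String)) : Prop := out = parse_speakers_alt text
instance (text : String) (out : List (String × String)) : Decidable (Spec_parse_speakers text out) := by unfold Spec_parse_speakers; infer_instance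

-- ===== CLAIM (what is proved, stated in full; the proofs are below) =====
def Claim_equal_parse_speakers : Prop := ∀ (text : String), Dom_parse_speakers text → Spec_parse_speakers text (parse_speakers text)

-- ===== LEMMAS AND PROOFS =====

-- splitOnMax.go with maxsplit exhausted returns the rest as one last piece
theorem psGo0 (sep : List Char) (fuel : Nat) (l cur : List Char) (acc : List (List Char)) :
    PySem.Chars.splitOnMax.go sep fuel 0 l cur acc = ((cur.reverse ++ l) :: acc).reverse := by
  cases fuel with
  | zero => simp [PySem.Chars.splitOnMax.go]
  | succ n => cases l with
    | nil => simp [PySem.Chars.splitOnMax.go]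
    | cons c rest => simp [PySem.Chars.splitOnMax.go]

-- splitOnMax.go on ':' with maxsplit 1 cuts a string containing ':' into exactly two pieces
theorem psGo1 (s : List Char) (hs : ':' ∈ s) :
    ∀ (fuel : Nat) (cur : List Char) (acc : List (List Char)), s.length < fuel →
      ∃ a b, PySem.Chars.splitOnMax.go [':'] fuel 1 s cur acc = acc.reverse ++ [a, b] := by
  induction s with
  | nil => simp at hs
  | cons c rest ih =>
      intro fuel cur acc hfuel
      cases fuel with
      | zero => omega
      | succ n =>
          by_cases hpre : List.isPrefixOf [':'] (c :: rest) = true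
          · refine ⟨cur.reverse, rest, ?_⟩
            simp only [PySem.Chars.splitOnMax.go, hpre, if_true]
            rw [psGo0]
            simp
          · have hc : c ≠ ':' := by
              intro h; subst h; simp [List.isPrefixOf] at hpre
            have hrest : ':' ∈ rest := by
              rcases List.mem_cons.mp hs with h | h
              · exact absurd h.symm hc
              · exact h
            have hlen : rest.length < n := by simp at hfuel; omega
            obtain ⟨a, b, hab⟩ := ih hrest n (c :: cur) acc hlen
            refine ⟨a, b, ?_⟩
            simpa [PySem.Chars.splitOnMax.go, hpre] using hab

-- a line containing ':' splits under maxsplit=1 into exactly two parts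
theorem psParts_two (line : String) (h : PySem.Str.isIn ":" line = true) :
    1 < ((PySem.Str.splitMax? line ":" 1).getD []).length := by
  have hmem : ':' ∈ line.toList := by
    have := (PySem.Chars.isIn_iff_infix (":" : String).toList line.toList).mp h
    exact (List.singleton_infix_iff _ _).mp (by simpa using this)
  have hlt : line.toList.length < line.length + 1 := by simp
  obtain ⟨a, b, hab⟩ := psGo1 line.toList hmem (line.length + 1) [] []  hlt
  simp only [PySem.Str.splitMax?, PySem.Chars.splitMax?, PySem.Chars.splitOnMax]
  norm_num
  rw [show ((":" : String).toList) = [':'] from rfl, hab]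
  simp

-- A's `len(x) > 0` test and B's `x != ''` test agree
theorem psLen_pos_iff (s : String) : 0 < PySem.Str.len s ↔ s ≠ "" := by
  rw [PySem.Str.len]
  constructor
  · intro h hs; subst hs; simp at h
  · intro h
    have : s.toList ≠ [] := fun hn => h (String.toList_eq_nil_iff.mp hn)
    have : 0 < s.toList.length := List.length_pos_of_ne_nil this
    exact_mod_cast this

-- psIsHeader agrees with A's header test
theorem psHeader_iff (line : String) :
    psIsHeader line = true ↔
      (PySem.Str.isIn ":" line = true ∧
        0 < PySem.Str.len (PySem.Str.strip (PySem.List.pyGetD ((PySem.Str.split? line ":").getD []) 0 ""))) := by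
  rw [psIsHeader]
  simp only [Bool.and_eq_true, Bool.not_eq_true', beq_eq_false_iff_ne, ne_eq]
  exact and_congr_right fun _ => (psLen_pos_iff _).symm

-- proof-side segmented view of the scan: one step of grouping the cleaned lines into
-- (speaker, dialogue-lines) segments
def psSeg (segs : List (String × List String)) (line : String) : List (String × List String) :=
  if psIsHeader line = true then
    let parts := (PySem.Str.splitMax? line ":" 1).getD []
    segs ++ [(psName (PySem.List.pyGetD parts 0 ""),
      [PySem.Str.strip (PySem.List.pyGetD parts 1 "")])]
  else if segs ≠ [] ∧ (segs.getLast?.getD ("", [])).1 ≠ "" then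
    segs.dropLast ++ [((segs.getLast?.getD ("", [])).1, (segs.getLast?.getD ("", [])).2 ++ [line])]
  else segs

-- closing the segments into the final dict
def psDictOf (d : PySem.Dict String String) (segs : List (String × List String)) :
    PySem.Dict String String :=
  segs.foldl (fun d nb => if nb.1 ≠ "" then d.insert nb.1 (PySem.Str.join " " nb.2) else d) d

-- A's loop state as a function of the segment list (the dict holds the closed segments)
def psState (d : PySem.Dict String String) (segs : List (String × List String)) :
    PySem.Dict String String × Option String × List String :=
  match segs.getLast? with
  | none => (d, none, [])
  | some nb => (psDictOf d segs.dropLast, some nb.1, nb.2)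

-- invariant: the open segment's dialogue list is never empty
def psInv (segs : List (String × List String)) : Prop :=
  ∀ nb ∈ segs.getLast?, nb.2 ≠ ([] : List String)

theorem psStep_sim (d : PySem.Dict String String) (segs : List (String × List String))
    (x : String) (hne : PySem.Str.strip x ≠ "") (hinv : psInv segs) :
    psStepA (psState d segs) x = psState d (psSeg segs (PySem.Str.strip x)) ∧
      psInv (psSeg segs (PySem.Str.strip x)) := by
  simp only [psStepA, psSeg]
  generalize hl : PySem.Str.strip x = line at hne ⊢
  rw [if_neg hne]
  by_cases hhdr : psIsHeader line = true
  · -- header line: A saves the previous speaker and opens a new one; the segmented view closes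
    -- the last segment implicitly and appends a fresh one
    have hA := (psHeader_iff line).mp hhdr
    rw [if_pos hA, if_pos hhdr, if_pos (psParts_two line hA.1)]
    constructor
    · rcases List.eq_nil_or_concat segs with rfl | ⟨L, nb, rfl⟩
      · simp [psState, psDictOf]
      · have hb : nb.2 ≠ [] := hinv nb (by simp)
        by_cases hn : nb.1 = ""
        · simp [psState, psDictOf, List.concat_eq_append, List.foldl_append, hn, hb]
        · simp [psState, psDictOf, List.concat_eq_append, List.foldl_append, hn, hb]
    · intro nb hnb
      simp [List.getLast?_append] at hnb
      subst hnb
      simp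
  · -- ordinary line: A appends to current_text iff the current speaker is truthy;
    -- the segmented view extends the last segment iff it exists with a truthy speaker
    have hA : ¬(PySem.Str.isIn ":" line = true ∧
        0 < PySem.Str.len (PySem.Str.strip (PySem.List.pyGetD ((PySem.Str.split? line ":").getD []) 0 ""))) :=
      fun h => hhdr ((psHeader_iff line).mpr h)
    rw [if_neg hA, if_neg hhdr]
    rcases List.eq_nil_or_concat segs with rfl | ⟨L, nb, rfl⟩
    · exact ⟨by simp [psState], by simp [psInv]⟩
    · have hb : nb.2 ≠ [] := hinv nb (by simp)
      by_cases hn : nb.1 = ""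
      · refine ⟨?_, ?_⟩
        · simp [psState, List.concat_eq_append, hn]
        · simpa [psInv, List.concat_eq_append, hn] using hinv
      · refine ⟨?_, ?_⟩
        · simp [psState, List.concat_eq_append, hn]
        · simp [psInv, List.concat_eq_append, hn]

set_option maxHeartbeats 1000000 in
theorem psFold_sim (xs : List String) (d : PySem.Dict String String)
    (segs : List (String × List String)) (hinv : psInv segs) :
    xs.foldl psStepA (psState d segs) =
        psState d (((xs.map PySem.Str.strip).filter (· ≠ "")).foldl psSeg segs) ∧
      psInv (((xs.map PySem.Str.strip).filter (· ≠ "")).foldl psSeg segs) := by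
  induction xs generalizing segs with
  | nil => exact ⟨rfl, hinv⟩
  | cons x xs ih =>
      by_cases h : PySem.Str.strip x = ""
      · have hskip : psStepA (psState d segs) x = psState d segs := by
          simp [psStepA, h]
        simp only [List.foldl_cons, hskip, List.map_cons, List.filter_cons, h]
        simpa using ih segs hinv
      · obtain ⟨h1, h2⟩ := psStep_sim d segs x h hinv
        simp only [List.foldl_cons, h1, List.map_cons, List.filter_cons]
        rw [if_pos (by simpa using h)]
        exact ih _ h2

-- finalizing A's state = closing the last segment
theorem psFinal (d : PySem.Dict String String) (segs : List (String × List String))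
    (hinv : psInv segs) :
    (if (psState d segs).2.1.getD "" ≠ "" ∧ (psState d segs).2.2 ≠ [] then
        (psState d segs).1.insert ((psState d segs).2.1.getD "")
          (PySem.Str.join " " (psState d segs).2.2)
      else (psState d segs).1) = psDictOf d segs := by
  rcases List.eq_nil_or_concat segs with rfl | ⟨L, nb, rfl⟩
  · simp [psState, psDictOf]
  · have hb : nb.2 ≠ [] := hinv nb (by simp)
    simp only [psState]
    by_cases hn : nb.1 = ""
    · simp [hn, psDictOf, List.concat_eq_append, List.foldl_append]
    · simp [hn, hb, psDictOf, List.concat_eq_append, List.foldl_append]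

-- not-a-header, the continuation predicate
def psNH (l : String) : Bool := !psIsHeader l

-- the block decomposition of the cleaned lines: at each header open a block holding the header's
-- tail plus (when the cleaned name is truthy) the run of continuation lines up to the next header
def psBlocks : List String → List (String × List String)
  | [] => []
  | l :: ls =>
    if psIsHeader l then
      let parts := (PySem.Str.splitMax? l ":" 1).getD []
      let name := psName (PySem.List.pyGetD parts 0 "")
      (name, PySem.Str.strip (PySem.List.pyGetD parts 1 "") ::
          (if name ≠ "" then ls.takeWhile psNH else [])) :: psBlocks (ls.dropWhile psNH)
    else psBlocks ls
termination_by ls => ls.length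
decreasing_by
  · have := List.length_dropWhile_le psNH ls; simpa using Nat.lt_succ_of_le this
  · simp

theorem psBlocks_nil : psBlocks [] = [] := by rw [psBlocks.eq_def]

theorem psBlocks_cons (l : String) (ls : List String) :
    psBlocks (l :: ls) =
      (if psIsHeader l then
        (psName (PySem.List.pyGetD ((PySem.Str.splitMax? l ":" 1).getD []) 0 ""),
          PySem.Str.strip (PySem.List.pyGetD ((PySem.Str.splitMax? l ":" 1).getD []) 1 "") ::
            (if psName (PySem.List.pyGetD ((PySem.Str.splitMax? l ":" 1).getD []) 0 "") ≠ ""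
              then ls.takeWhile psNH else [])) :: psBlocks (ls.dropWhile psNH)
      else psBlocks ls) := by rw [psBlocks.eq_def]

-- the first line the continuation run stops at is a header
theorem psDropWhile_head (p : String → Bool) : ∀ (l : List String) (r : String) (rs : List String),
    l.dropWhile p = r :: rs → p r = false := by
  intro l
  induction l with
  | nil => intro r rs h; simp at h
  | cons x xs ih =>
      intro r rs h
      by_cases hx : p x = true
      · rw [List.dropWhile_cons_of_pos hx] at h
        exact ih r rs h
      · rw [List.dropWhile_cons_of_neg (by simpa using hx)] at h
        injection h with h1 _
        subst h1
        simpa using hx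

-- the scan never empties a non-empty segment list
theorem psSeg_ne_nil (t : List (String × List String)) (ht : t ≠ []) (l : String) :
    psSeg t l ≠ [] := by
  rw [psSeg]
  split_ifs <;> simp [ht]

-- closed segments are inert under one step of the scan
theorem psSeg_step_prefix (segs t : List (String × List String)) (ht : t ≠ []) (l : String) :
    psSeg (segs ++ t) l = segs ++ psSeg t l := by
  rcases List.eq_nil_or_concat t with rfl | ⟨L, nb, rfl⟩
  · exact absurd rfl ht
  · by_cases hhdr : psIsHeader l = true
    · simp [psSeg, hhdr]
    · by_cases hn : nb.1 = ""
      · simp [psSeg, hhdr, List.concat_eq_append, hn, ← List.append_assoc]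
      · simp [psSeg, hhdr, List.concat_eq_append, hn, ← List.append_assoc]

-- closed segments are inert under the whole scan
theorem psSeg_prefix (ls : List String) (segs t : List (String × List String)) (ht : t ≠ []) :
    ls.foldl psSeg (segs ++ t) = segs ++ ls.foldl psSeg t := by
  induction ls generalizing t with
  | nil => rfl
  | cons l ls ih =>
      simp only [List.foldl_cons]
      rw [psSeg_step_prefix segs t ht l]
      exact ih _ (psSeg_ne_nil t ht l)

-- scanning with one open segment: the continuation run joins the open segment (when its name is
-- truthy), and the rest decomposes into blocks
theorem psSeg_open (ls : List String) : ∀ (n : String) (b : List String), b ≠ [] →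
    ls.foldl psSeg [(n, b)] =
      (n, b ++ (if n ≠ "" then ls.takeWhile psNH else [])) :: psBlocks (ls.dropWhile psNH) := by
  induction ls with
  | nil => intro n b _; simp [psBlocks_nil]
  | cons l ls ih =>
      intro n b hb
      by_cases hhdr : psIsHeader l = true
      · have hstep : psSeg [(n, b)] l = [(n, b)] ++
            [(psName (PySem.List.pyGetD ((PySem.Str.splitMax? l ":" 1).getD []) 0 ""),
              [PySem.Str.strip (PySem.List.pyGetD ((PySem.Str.splitMax? l ":" 1).getD []) 1 "")])] := by
          simp [psSeg, hhdr]
        have hnh : psNH l = false := by simp [psNH, hhdr]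
        simp only [List.foldl_cons, hstep]
        rw [psSeg_prefix ls [(n, b)] _ (by simp), ih _ _ (by simp)]
        simp [psBlocks_cons, hnh, hhdr]
  -- non-header continuation line
      · have hnh : psNH l = true := by simp [psNH, hhdr]
        by_cases hn : n = ""
        · have hstep : psSeg [(n, b)] l = [(n, b)] := by simp [psSeg, hhdr, hn]
          simp only [List.foldl_cons, hstep]
          rw [ih _ _ hb]
          simp [hnh, hn]
        · have hstep : psSeg [(n, b)] l = [(n, b ++ [l])] := by simp [psSeg, hhdr, hn]
          simp only [List.foldl_cons, hstep]
          rw [ih _ _ (by simp)]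
          simp [hnh, hn]

-- full scan from the empty state = the block decomposition
theorem psSeg_blocks (ls : List String) : ls.foldl psSeg [] = psBlocks ls := by
  induction ls with
  | nil => rw [psBlocks_nil]; rfl
  | cons l ls ih =>
      by_cases hhdr : psIsHeader l = true
      · have hstep : psSeg [] l =
            [(psName (PySem.List.pyGetD ((PySem.Str.splitMax? l ":" 1).getD []) 0 ""),
              [PySem.Str.strip (PySem.List.pyGetD ((PySem.Str.splitMax? l ":" 1).getD []) 1 "")])] := by
          simp [psSeg, hhdr]
        simp only [List.foldl_cons, hstep]
        rw [psSeg_open ls _ _ (by simp), psBlocks_cons]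
        simp [hhdr]
      · have hstep : psSeg [] l = [] := by simp [psSeg, hhdr]
        simp only [List.foldl_cons, hstep]
        rw [ih, psBlocks_cons]
        simp [hhdr]

-- header positions starting from offset s
def psIdxFrom (s : Int) : List String → List Int
  | [] => []
  | l :: ls => if psIsHeader l then s :: psIdxFrom (s + 1) ls else psIdxFrom (s + 1) ls

-- the port's enumerate/filter/map comprehension computes psIdxFrom
theorem psIdx_eq (ls : List String) : ∀ (s : Int),
    ((PySem.List.enumerate ls s).filter (fun p => psIsHeader p.2)).map Prod.fst = psIdxFrom s ls := by
  induction ls with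
  | nil => intro s; simp [PySem.List.enumerate_nil, psIdxFrom]
  | cons l ls ih =>
      intro s
      rw [PySem.List.enumerate_cons]
      by_cases hhdr : psIsHeader l = true
      · simp [psIdxFrom, hhdr, ih]
      · simp [psIdxFrom, hhdr, ih]

-- skipping a continuation run shifts the offset by its length
theorem psIdxFrom_skip (ls : List String) : ∀ (s : Int),
    psIdxFrom s ls = psIdxFrom (s + ((ls.takeWhile psNH).length : Int)) (ls.dropWhile psNH) := by
  induction ls with
  | nil => intro s; simp
  | cons l ls ih =>
      intro s
      by_cases hnh : psNH l = true
      · have hhdr : ¬ psIsHeader l = true := by simp [psNH] at hnh; simp [hnh]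
        rw [List.takeWhile_cons_of_pos hnh, List.dropWhile_cons_of_pos hnh]
        simp only [psIdxFrom, if_neg hhdr]
        rw [ih (s + 1)]
        congr 1
        simp only [List.length_cons]
        push_cast
        ring
      · have hp : psNH l = false := by simpa using hnh
        rw [List.takeWhile_cons_of_neg (by simp [hp]), List.dropWhile_cons_of_neg (by simp [hp])]
        simp

-- the slice between consecutive header positions is exactly the continuation run:
-- main simulation of B's random-access loop against the block decomposition
theorem psMain (N : Nat) : ∀ (ls : List String), ls.length ≤ N →
    ∀ (pre : List String) (d : PySem.Dict String String),
    (((psIdxFrom (pre.length : Int) ls).zip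
        ((psIdxFrom (pre.length : Int) ls).drop 1 ++ [((pre ++ ls).length : Int)])).foldl
      (psAltStep (pre ++ ls)) d) = psDictOf d (psBlocks ls) := by
  induction N with
  | zero =>
      intro ls hls pre d
      rcases ls with _ | ⟨a, b⟩
      · simp [psIdxFrom, psBlocks_nil, psDictOf]
      · simp at hls
  | succ N ih =>
      intro ls hls pre d
      cases ls with
      | nil => simp [psIdxFrom, psBlocks_nil, psDictOf]
      | cons l ls' =>
          have hls' : ls'.length ≤ N := by simp at hls; omega
          by_cases hhdr : psIsHeader l = true
          · -- header at absolute position pre.length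
            have hskip := psIdxFrom_skip ls' ((pre.length : Int) + 1)
            have hget : PySem.List.pyGetD (pre ++ l :: ls') ((pre.length : Nat) : Int) "" = l := by
              rw [PySem.List.pyGetD_natCast]
              simp [List.getD]
            have hcons : psIdxFrom ((pre.length : Nat) : Int) (l :: ls') =
                ((pre.length : Nat) : Int) :: psIdxFrom ((pre.length : Int) + 1) ls' := by
              rw [psIdxFrom]
              simp [hhdr]
            -- the dialogue slice between this header and the next boundary
            have hslice : PySem.List.slice (pre ++ l :: ls') (some ((pre.length : Int) + 1))
                (some ((pre.length : Int) + 1 + ((ls'.takeWhile psNH).length : Int))) =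
                  ls'.takeWhile psNH := by
              have h1 : ((pre.length : Int) + 1) = ((pre.length + 1 : Nat) : Int) := by push_cast; ring
              have h2 : ((pre.length : Int) + 1 + ((ls'.takeWhile psNH).length : Int)) =
                  ((pre.length + 1 + (ls'.takeWhile psNH).length : Nat) : Int) := by push_cast; ring
              rw [h2, h1, PySem.List.slice_natCast]
              have hdrop : (pre ++ l :: ls').drop (pre.length + 1) = ls' := by
                have h3 : pre ++ l :: ls' = (pre ++ [l]) ++ ls' := by simp
                rw [h3, List.drop_left' (by simp)]
              rw [hdrop, show pre.length + 1 + (ls'.takeWhile psNH).length - (pre.length + 1) =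
                (ls'.takeWhile psNH).length from by omega]
              exact (List.prefix_iff_eq_take.mp (List.takeWhile_prefix psNH)).symm
            rcases hr : ls'.dropWhile psNH with _ | ⟨r, rs⟩
            · -- no further header: a single pair ending at the length of the whole list
              have hcont_all : ls'.takeWhile psNH = ls' := by
                conv_rhs => rw [← List.takeWhile_append_dropWhile (p := psNH) (l := ls')]
                rw [hr]
                simp
              have his' : psIdxFrom ((pre.length : Int) + 1) ls' = [] := by
                rw [hskip, hr]
                simp [psIdxFrom]
              have hlen : (((pre ++ l :: ls').length : Nat) : Int) =
                  ((pre.length : Int) + 1 + ((ls'.takeWhile psNH).length : Int)) := by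
                simp [hcont_all]
                ring
              rw [hcons, his', hlen]
              simp only [List.drop_one, List.tail_cons, List.nil_append, List.zip_cons_cons,
                List.zip_nil_right, List.foldl_cons, List.foldl_nil]
              rw [psBlocks_cons]
              simp only [if_pos hhdr]
              rw [hr, psBlocks_nil]
              simp only [psDictOf, List.foldl_cons, List.foldl_nil, psAltStep, hget]
              by_cases hn : psName (PySem.List.pyGetD ((PySem.Str.splitMax? l ":" 1).getD []) 0 "") = ""
              · simp [hn]
              · simp only [ne_eq, hn, not_false_eq_true, if_true]
                rw [hslice]
                simp [hcont_all]
            · -- a next header exists: it bounds this slice, and the loop continues on the rest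
              have hrh : psIsHeader r = true := by
                have h := psDropWhile_head psNH ls' r rs hr
                simpa [psNH] using h
              have his' : psIdxFrom ((pre.length : Int) + 1) ls' =
                  ((pre.length : Int) + 1 + ((ls'.takeWhile psNH).length : Int)) ::
                    psIdxFrom ((pre.length : Int) + 1 + ((ls'.takeWhile psNH).length : Int) + 1) rs := by
                rw [hskip, hr, psIdxFrom]
                simp [hrh]
              rw [hcons, his']
              simp only [List.drop_one, List.tail_cons, List.cons_append, List.zip_cons_cons,
                List.foldl_cons]
              -- the first step inserts exactly the first block
              have hstep1 : psAltStep (pre ++ l :: ls') d (((pre.length : Nat) : Int),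
                    ((pre.length : Int) + 1 + ((ls'.takeWhile psNH).length : Int))) =
                  psDictOf d [(psName (PySem.List.pyGetD ((PySem.Str.splitMax? l ":" 1).getD []) 0 ""),
                    PySem.Str.strip (PySem.List.pyGetD ((PySem.Str.splitMax? l ":" 1).getD []) 1 "") ::
                      (if psName (PySem.List.pyGetD ((PySem.Str.splitMax? l ":" 1).getD []) 0 "") ≠ ""
                        then ls'.takeWhile psNH else []))] := by
                simp only [psAltStep, hget, psDictOf, List.foldl_cons, List.foldl_nil]
                by_cases hn : psName (PySem.List.pyGetD ((PySem.Str.splitMax? l ":" 1).getD []) 0 "") = ""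
                · simp [hn]
                · simp only [ne_eq, hn, not_false_eq_true, if_true]
                  rw [hslice]
                  simp
              rw [hstep1]
              -- the remaining pairs are exactly the recursion on the rest, shifted past this block
              have hfull : (pre ++ l :: ls'.takeWhile psNH) ++ (r :: rs) = pre ++ l :: ls' := by
                rw [← hr]
                simp [List.takeWhile_append_dropWhile]
              have hlenrest : (r :: rs).length ≤ N := by
                have h1 : (ls'.dropWhile psNH).length ≤ ls'.length := List.length_dropWhile_le _ _
                rw [hr] at h1
                omega
              have hidx : psIdxFrom (((pre ++ l :: ls'.takeWhile psNH).length : Nat) : Int) (r :: rs) =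
                  ((pre.length : Int) + 1 + ((ls'.takeWhile psNH).length : Int)) ::
                    psIdxFrom ((pre.length : Int) + 1 + ((ls'.takeWhile psNH).length : Int) + 1) rs := by
                rw [psIdxFrom]
                have harith : (((pre ++ l :: ls'.takeWhile psNH).length : Nat) : Int) =
                    ((pre.length : Int) + 1 + ((ls'.takeWhile psNH).length : Int)) := by
                  simp
                  ring
                rw [harith]
                simp [hrh]
              have hrec := ih (r :: rs) hlenrest (pre ++ l :: ls'.takeWhile psNH)
                (psDictOf d [(psName (PySem.List.pyGetD ((PySem.Str.splitMax? l ":" 1).getD []) 0 ""),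
                  PySem.Str.strip (PySem.List.pyGetD ((PySem.Str.splitMax? l ":" 1).getD []) 1 "") ::
                    (if psName (PySem.List.pyGetD ((PySem.Str.splitMax? l ":" 1).getD []) 0 "") ≠ ""
                      then ls'.takeWhile psNH else []))])
              rw [hfull, hidx] at hrec
              simp only [List.drop_one, List.tail_cons] at hrec
              rw [psBlocks_cons]
              simp only [hhdr, if_true, hr]
              rw [hrec]
              simp only [psDictOf, List.foldl_cons, List.foldl_nil]
          · -- continuation line before any header: shift the prefix by one
            have hcons : psIdxFrom ((pre.length : Nat) : Int) (l :: ls') =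
                psIdxFrom (((pre ++ [l]).length : Nat) : Int) ls' := by
              rw [psIdxFrom]
              rw [if_neg hhdr]
              congr 1
              simp
            have hfull : pre ++ l :: ls' = (pre ++ [l]) ++ ls' := by simp
            rw [hcons, hfull, ih ls' hls' (pre ++ [l]) d, psBlocks_cons]
            simp [hhdr]

-- ===== VERDICT (by name: the statement is the Claim_ definition above) =====
theorem parse_speakers_spec : Claim_equal_parse_speakers := by
  intro text _
  unfold Spec_parse_speakers parse_speakers parse_speakers_alt
  by_cases htext : text = ""
  · simp [htext]
  · simp only [htext, if_false]
    have h0 : psInv ([] : List (String × List String)) := by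
      intro nb hnb; simp at hnb
    obtain ⟨hsim, hinv⟩ := psFold_sim ((PySem.Str.split? text "\n").getD []) PySem.Dict.empty [] h0
    have hstart : (PySem.Dict.empty, none, ([] : List String)) =
        psState PySem.Dict.empty ([] : List (String × List String)) := rfl
    rw [hstart, hsim, psFinal _ _ hinv, psSeg_blocks]
    -- B side: the comprehension is psIdxFrom, idx[1:] is drop 1, and the main simulation applies
    -- with an empty prefix
    rw [PySem.List.slice_from_one, psIdx_eq _ 0]
    have hmain := psMain ((((PySem.Str.split? text "\n").getD []).map PySem.Str.strip).filter (· ≠ "")).length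
      ((((PySem.Str.split? text "\n").getD []).map PySem.Str.strip).filter (· ≠ "")) (le_refl _)
      [] PySem.Dict.empty
    simp only [List.nil_append, List.length_nil, Nat.cast_zero] at hmain
    rw [← List.drop_one, hmain]
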